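-- pv_equiv track=rewrite | github.com/Manjunath-L/python-class | strings/str1.py | alpswapcase
-- ===== SOURCE A (Python) =====
-- def alpswapcase(s1):
--     newstr = ""
--     for i in range(len(s1)):
--         if "a" <= s1[i] <= "z":
--             newstr += chr(ord(s1[i]) - 32)
--         elif "A" <= s1[i] <= "Z":
--             newstr += chr(ord(s1[i]) + 32)
--         else:
--             newstr += s1[i]
--     return newstr
-- ===== SOURCE B (Python) =====
-- _TABLE = str.maketrans(
--     "abcdefghijklmnopqrstuvwxyzABCDEFGHIJKLMNOPQRSTUVWXYZ",
--     "ABCDEFGHIJKLMNOPQRSTUVWXYZabcdefghijklmnopqrstuvwxyz",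
-- )
--
-- def alpswapcase(s1):
--     return s1.translate(_TABLE)
-- ===== Notes on version B (the rewrite author's own statement) =====
-- stated objective: idiomatic
-- what changed: Replaced the per-character index loop with three comparison branches by a precomputed 52-entry translation table (str.maketrans) applied in one s1.translate call.
import Mathlib
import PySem

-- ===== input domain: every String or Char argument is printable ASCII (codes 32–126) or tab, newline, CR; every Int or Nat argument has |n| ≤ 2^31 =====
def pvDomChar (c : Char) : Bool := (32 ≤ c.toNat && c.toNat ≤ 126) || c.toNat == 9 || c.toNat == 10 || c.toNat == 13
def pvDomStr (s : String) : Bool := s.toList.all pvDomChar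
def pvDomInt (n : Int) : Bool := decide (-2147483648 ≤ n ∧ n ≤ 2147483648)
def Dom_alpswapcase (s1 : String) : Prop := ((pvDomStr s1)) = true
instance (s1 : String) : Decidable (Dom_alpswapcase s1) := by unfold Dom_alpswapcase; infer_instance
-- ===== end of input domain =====

-- B replaces A's index loop with three comparison branches by a precomputed 52-entry
-- translation table applied in a single pass (more idiomatic; avoids quadratic string appends).

-- ===== PORT A =====
def alpswapcase (s1 : String) : String :=
  String.ofList <|
    (PySem.List.pyRange 0 (PySem.Str.len s1) 1).foldl
      (fun acc i =>
        let c := PySem.List.pyGetD s1.toList i ' '   -- s1[i]; index always in range in this loop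
        if 'a' ≤ c ∧ c ≤ 'z' then acc ++ [Char.ofNat (c.toNat - 32)]
        else if 'A' ≤ c ∧ c ≤ 'Z' then acc ++ [Char.ofNat (c.toNat + 32)]
        else acc ++ [c]) []

-- ===== PORT B =====
def pvTable_alpswapcase : PySem.Dict Char Char :=
  PySem.Dict.ofList
    ("abcdefghijklmnopqrstuvwxyzABCDEFGHIJKLMNOPQRSTUVWXYZ".toList.zip
     "ABCDEFGHIJKLMNOPQRSTUVWXYZabcdefghijklmnopqrstuvwxyz".toList)

def alpswapcase_alt (s1 : String) : String :=
  String.ofList (s1.toList.map (fun c => pvTable_alpswapcase.getD c c))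

-- ===== PRECONDITION & SPEC =====
def Spec_alpswapcase (s1 : String) (out : String) : Prop := out = alpswapcase_alt s1
instance (s1 : String) (out : String) : Decidable (Spec_alpswapcase s1 out) := by unfold Spec_alpswapcase; infer_instance

-- ===== CLAIM (what is proved, stated in full; the proofs are below) =====
def Claim_equal_alpswapcase : Prop := ∀ (s1 : String), Dom_alpswapcase s1 → Spec_alpswapcase s1 (alpswapcase s1)

-- ===== LEMMAS AND PROOFS =====

-- A's per-character transformation, factored out for the proof.
def pvStepA (c : Char) : Char :=
  if 'a' ≤ c ∧ c ≤ 'z' then Char.ofNat (c.toNat - 32)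
  else if 'A' ≤ c ∧ c ≤ 'Z' then Char.ofNat (c.toNat + 32)
  else c

theorem pvStepA_eq_table (c : Char) (h : pvDomChar c = true) :
    pvStepA c = pvTable_alpswapcase.getD c c := by
  have hlt : c.toNat < 127 := by
    unfold pvDomChar at h
    simp only [Bool.or_eq_true, Bool.and_eq_true, decide_eq_true_eq, beq_iff_eq] at h
    omega
  have hall : ∀ n < 127, pvStepA (Char.ofNat n) =
      pvTable_alpswapcase.getD (Char.ofNat n) (Char.ofNat n) := by
    set_option maxRecDepth 4000 in decide
  have := hall c.toNat hlt
  simpa [Char.ofNat_toNat] using this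

-- ===== VERDICT (by name: the statement is the Claim_ definition above) =====
set_option maxRecDepth 8000 in
theorem alpswapcase_spec : Claim_equal_alpswapcase := by
  intro s1 hdom
  unfold Spec_alpswapcase alpswapcase alpswapcase_alt
  have hstep :
      (fun (acc : List Char) (i : Int) =>
        let c := PySem.List.pyGetD s1.toList i ' '
        if 'a' ≤ c ∧ c ≤ 'z' then acc ++ [Char.ofNat (c.toNat - 32)]
        else if 'A' ≤ c ∧ c ≤ 'Z' then acc ++ [Char.ofNat (c.toNat + 32)]
        else acc ++ [c]) =
      (fun (acc : List Char) (i : Int) =>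
        acc ++ [pvStepA (PySem.List.pyGetD s1.toList i ' ')]) := by
    funext acc i
    simp only [pvStepA]
    split_ifs <;> rfl
  rw [hstep]
  have hlen : PySem.Str.len s1 = PySem.List.len s1.toList := by
    simp [PySem.Str.len_eq, PySem.List.len]
  rw [hlen,
    PySem.List.foldl_pyRange_zero_pyGetD s1.toList ' '
      (fun acc c => acc ++ [pvStepA c]) [],
    PySem.List.foldl_append_singleton_eq_map]
  simp only [List.nil_append]
  congr 1
  apply List.map_congr_left
  intro c hc
  have hdc : pvDomChar c = true := by
    unfold Dom_alpswapcase pvDomStr at hdom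
    exact List.all_eq_true.mp hdom c hc
  exact pvStepA_eq_table c hdc
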